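-- pv_equiv track=rewrite | github.com/DolphinLong/dersdagitimprogrami | algorithms/base_scheduler.py | _create_lesson_blocks
-- ===== SOURCE A (Python) =====
-- from typing import List, Dict, Tuple, Optional, Set
--
-- def _create_lesson_blocks(total_hours: int) -> List[int]:
--     """
--     Template method for scheduler-specific block creation
--     Subclasses can override this to provide custom block distribution logic
--
--     Default implementation creates smart blocks with optimal distribution:
--     - Prioritizes 2-hour blocks
--     - Adds single hour for odd numbers
--
--     Examples:
--     - 1 hour: [1]
--     - 2 hours: [2]
--     - 3 hours: [2, 1]
--     - 4 hours: [2, 2]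
--     - 5 hours: [2, 2, 1]
--     - 6 hours: [2, 2, 2]
--     - 7 hours: [2, 2, 2, 1]
--     - 8 hours: [2, 2, 2, 2]
--
--     Args:
--         total_hours: Total weekly hours for the lesson
--
--     Returns:
--         List of block sizes
--     """
--     if total_hours <= 0:
--         return []
--
--     blocks = []
--     remaining = total_hours
--
--     # Fill with 2-hour blocks first
--     while remaining >= 2:
--         blocks.append(2)
--         remaining -= 2
--
--     # Add remaining single hour if any
--     if remaining == 1:
--         blocks.append(1)
--
--     return blocks
-- ===== SOURCE B (Python) =====
-- from typing import List
--
-- def _create_lesson_blocks(total_hours: int) -> List[int]: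
--     if total_hours <= 0:
--         return []
--     return [2] * (total_hours // 2) + [1] * (total_hours % 2)
-- ===== Notes on version B (the rewrite author's own statement) =====
-- stated objective: simpler
-- what changed: Replaces the repeated-decrement while loop with a closed-form list built from total_hours // 2 two-hour blocks and total_hours % 2 single hours.
import Mathlib
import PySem

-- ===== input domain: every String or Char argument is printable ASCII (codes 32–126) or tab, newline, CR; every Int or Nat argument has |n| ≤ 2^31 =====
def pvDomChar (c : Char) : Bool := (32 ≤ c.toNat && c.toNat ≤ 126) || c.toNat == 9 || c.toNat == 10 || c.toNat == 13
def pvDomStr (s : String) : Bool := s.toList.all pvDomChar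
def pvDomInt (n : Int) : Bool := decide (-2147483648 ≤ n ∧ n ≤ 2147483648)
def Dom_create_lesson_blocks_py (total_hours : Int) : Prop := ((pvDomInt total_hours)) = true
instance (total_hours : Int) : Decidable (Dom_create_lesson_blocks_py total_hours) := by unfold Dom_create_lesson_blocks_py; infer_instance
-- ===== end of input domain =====

-- ===== PORT A =====
-- Literal port of A: while-loop filling 2-hour blocks, then the odd single hour.
def pvBlockLoop (remaining : Int) (blocks : List Int) : List Int × Int :=
  if h : remaining ≥ 2 then pvBlockLoop (remaining - 2) (blocks ++ [2]) else (blocks, remaining)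
termination_by remaining.toNat
decreasing_by omega

def create_lesson_blocks_py (total_hours : Int) : List Int :=
  if total_hours ≤ 0 then []
  else
    let p := pvBlockLoop total_hours []
    if p.2 == 1 then p.1 ++ [1] else p.1

-- ===== PORT B =====
-- B: closed form, [2] * (total_hours // 2) + [1] * (total_hours % 2).
def create_lesson_blocks_py_alt (total_hours : Int) : List Int :=
  if total_hours ≤ 0 then []
  else List.replicate (PySem.Int.floordiv total_hours 2).toNat 2
       ++ List.replicate (PySem.Int.mod total_hours 2).toNat 1

-- ===== PRECONDITION & SPEC =====
def Spec_create_lesson_blocks_py (total_hours : Int) (out : List Int) : Prop := out = create_lesson_blocks_py_alt total_hours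
instance (total_hours : Int) (out : List Int) : Decidable (Spec_create_lesson_blocks_py total_hours out) := by unfold Spec_create_lesson_blocks_py; infer_instance

-- ===== CLAIM (what is proved, stated in full; the proofs are below) =====
def Claim_equal_create_lesson_blocks_py : Prop := ∀ (total_hours : Int), Dom_create_lesson_blocks_py total_hours → Spec_create_lesson_blocks_py total_hours (create_lesson_blocks_py total_hours)

-- ===== LEMMAS AND PROOFS =====
theorem pvBlockLoop_eq (r : Int) (hr : 0 ≤ r) (acc : List Int) :
    pvBlockLoop r acc = (acc ++ List.replicate (r.toNat / 2) 2, (r.toNat % 2 : Int)) := by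
  by_cases h : r ≥ 2
  · rw [pvBlockLoop, dif_pos h, pvBlockLoop_eq (r - 2) (by omega)]
    have hdiv : r.toNat / 2 = (r - 2).toNat / 2 + 1 := by omega
    have hmod : (r - 2).toNat % 2 = r.toNat % 2 := by omega
    simp [hdiv, List.replicate_succ, List.append_assoc]
    omega
  · rw [pvBlockLoop, dif_neg h]
    have h1 : r.toNat / 2 = 0 := by omega
    simp [h1]
    omega
termination_by r.toNat
decreasing_by omega

-- ===== VERDICT (by name: the statement is the Claim_ definition above) =====
theorem create_lesson_blocks_py_spec : Claim_equal_create_lesson_blocks_py := by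
  intro t _
  unfold Spec_create_lesson_blocks_py create_lesson_blocks_py create_lesson_blocks_py_alt
  by_cases ht : t ≤ 0
  · simp [ht]
  · rw [if_neg ht, if_neg ht, pvBlockLoop_eq t (by omega)]
    have hfd : PySem.Int.floordiv t 2 = (t.toNat / 2 : Nat) := by
      simp [PySem.Int.floordiv, Int.fdiv_eq_ediv]; omega
    have hmd : PySem.Int.mod t 2 = (t.toNat % 2 : Nat) := by
      simp [PySem.Int.mod, Int.fmod_eq_emod]; omega
    rw [hfd, hmd]
    have h1 : ((t.toNat / 2 : Nat) : Int).toNat = t.toNat / 2 := by omega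
    have h2 : ((t.toNat % 2 : Nat) : Int).toNat = t.toNat % 2 := by omega
    rw [h1, h2]
    by_cases hp : t.toNat % 2 = 1
    · have hm : max t 0 % 2 = 1 := by omega
      simp [hp, hm]
    · have h0 : t.toNat % 2 = 0 := by omega
      have hm : ¬ (max t 0 % 2 = 1) := by omega
      simp [h0, hm]
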